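-- pv_equiv track=rewrite | github.com/OthmanMohammad/multi-agent-support-system | src/agents/essential/support/billing/discount_negotiator.py | _infer_reason_from_message
-- ===== SOURCE A (Python) =====
-- def _infer_reason_from_message(message: str) -> str:
--     """
--     Infer discount reason from message.
--
--     Args:
--         message: User message (lowercase)
--
--     Returns:
--         Reason string
--     """
--     if any(word in message for word in ["nonprofit", "charity", "non-profit", "501c3"]):
--         return "nonprofit"
--     elif any(word in message for word in ["student", "education", "university", "school"]):
--         return "student"
--     elif any(word in message for word in ["startup", "new company", "just started"]):
--         return "startup"
--     elif any(word in message for word in ["annual", "yearly", "pay upfront"]):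
--         return "annual"
--     elif any(word in message for word in ["volume", "many users", "large team"]):
--         return "volume"
--     elif any(word in message for word in ["budget", "expensive", "afford", "cost"]):
--         return "budget"
--     else:
--         return "general"
-- ===== SOURCE B (Python) =====
-- _KEYWORD_PRIORITY = {
--     "nonprofit": 0, "charity": 0, "non-profit": 0, "501c3": 0,
--     "student": 1, "education": 1, "university": 1, "school": 1,
--     "startup": 2, "new company": 2, "just started": 2,
--     "annual": 3, "yearly": 3, "pay upfront": 3,
--     "volume": 4, "many users": 4, "large team": 4,
--     "budget": 5, "expensive": 5, "afford": 5, "cost": 5,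
-- }
--
-- _REASONS = ["nonprofit", "student", "startup", "annual", "volume", "budget"]
--
-- def _infer_reason_from_message(message: str) -> str:
--     hits = [p for kw, p in _KEYWORD_PRIORITY.items() if kw in message]
--     if not hits:
--         return "general"
--     return _REASONS[min(hits)]
-- ===== Notes on version B (the rewrite author's own statement) =====
-- stated objective: alternative
-- what changed: Replaces the six-way first-match if/elif chain by a flat keyword-to-priority map: B collects the priorities of all keywords found in the message in one pass and returns the reason of the minimal priority (arg-min instead of ordered short-circuit control flow).
import Mathlib
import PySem

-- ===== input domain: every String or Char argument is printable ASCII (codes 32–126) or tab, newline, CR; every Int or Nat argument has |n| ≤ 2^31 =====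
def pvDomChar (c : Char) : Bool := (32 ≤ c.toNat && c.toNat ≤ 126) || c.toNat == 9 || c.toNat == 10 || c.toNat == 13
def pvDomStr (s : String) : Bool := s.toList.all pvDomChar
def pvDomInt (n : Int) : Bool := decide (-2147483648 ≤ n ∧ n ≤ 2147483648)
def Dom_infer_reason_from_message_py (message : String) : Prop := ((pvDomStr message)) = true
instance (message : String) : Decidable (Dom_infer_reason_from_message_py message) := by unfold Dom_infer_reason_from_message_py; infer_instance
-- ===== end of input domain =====

-- B replaces A's six-way if/elif keyword-group chain by a flat keyword→priority map:
-- it collects the priorities of ALL keywords occurring in the message and returns the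
-- reason with the minimal priority (objective: alternative — arg-min instead of
-- first-match control flow; same asymptotic cost).

-- ===== PORT A =====
def infer_reason_from_message_py (message : String) : String :=
  if (["nonprofit", "charity", "non-profit", "501c3"] : List String).any (fun word => PySem.Str.isIn word message) then
    "nonprofit"
  else if (["student", "education", "university", "school"] : List String).any (fun word => PySem.Str.isIn word message) then
    "student"
  else if (["startup", "new company", "just started"] : List String).any (fun word => PySem.Str.isIn word message) then
    "startup"
  else if (["annual", "yearly", "pay upfront"] : List String).any (fun word => PySem.Str.isIn word message) then
    "annual"
  else if (["volume", "many users", "large team"] : List String).any (fun word => PySem.Str.isIn word message) then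
    "volume"
  else if (["budget", "expensive", "afford", "cost"] : List String).any (fun word => PySem.Str.isIn word message) then
    "budget"
  else
    "general"

-- ===== PORT B =====
-- the dict _KEYWORD_PRIORITY as an association list in insertion order
def pvKeywordPriority : List (String × Int) :=
  [("nonprofit", 0), ("charity", 0), ("non-profit", 0), ("501c3", 0),
   ("student", 1), ("education", 1), ("university", 1), ("school", 1),
   ("startup", 2), ("new company", 2), ("just started", 2),
   ("annual", 3), ("yearly", 3), ("pay upfront", 3),
   ("volume", 4), ("many users", 4), ("large team", 4),
   ("budget", 5), ("expensive", 5), ("afford", 5), ("cost", 5)]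

def pvReasons : List String :=
  ["nonprofit", "student", "startup", "annual", "volume", "budget"]

def infer_reason_from_message_py_alt (message : String) : String :=
  -- hits = [p for kw, p in _KEYWORD_PRIORITY.items() if kw in message]
  let hits : List Int :=
    pvKeywordPriority.filterMap (fun kp => if PySem.Str.isIn kp.1 message then some kp.2 else none)
  if hits = [] then "general"
  else
    match hits.min? with
    | some m => (PySem.List.pyGet? pvReasons m).getD ""  -- _REASONS[min(hits)]; min is in [0,5] so pyGet? always returns
    | none => ""

-- ===== PRECONDITION & SPEC =====
def Spec_infer_reason_from_message_py (message : String) (out : String) : Prop := out = infer_reason_from_message_py_alt message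
instance (message : String) (out : String) : Decidable (Spec_infer_reason_from_message_py message out) := by unfold Spec_infer_reason_from_message_py; infer_instance

-- ===== CLAIM (what is proved, stated in full; the proofs are below) =====
def Claim_equal_infer_reason_from_message_py : Prop := ∀ (message : String), Dom_infer_reason_from_message_py message → Spec_infer_reason_from_message_py message (infer_reason_from_message_py message)

-- ===== LEMMAS AND PROOFS =====

-- the hits list restricted to an arbitrary sublist of the keyword table
def pvHitsOf (message : String) (l : List (String × Int)) : List Int :=
  l.filterMap (fun kp => if PySem.Str.isIn kp.1 message then some kp.2 else none)

lemma pvHitsOf_append (message : String) (l1 l2 : List (String × Int)) :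
    pvHitsOf message (l1 ++ l2) = pvHitsOf message l1 ++ pvHitsOf message l2 := by
  simp [pvHitsOf]

lemma pvSeg_all (message : String) (l : List (String × Int)) (i : Int)
    (h : ∀ p ∈ l, i ≤ p.2) : ∀ x ∈ pvHitsOf message l, i ≤ x := by
  intro x hx
  rw [pvHitsOf, List.mem_filterMap] at hx
  obtain ⟨a, ha, hfa⟩ := hx
  split at hfa
  · cases hfa; exact h a ha
  · exact (Option.some_ne_none x hfa.symm).elim

lemma pvSeg_of_any (message : String) (l : List (String × Int)) (i : Int)
    (hall : ∀ p ∈ l, p.2 = i)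
    (h : l.any (fun p => PySem.Str.isIn p.1 message) = true) :
    i ∈ pvHitsOf message l := by
  rw [List.any_eq_true] at h
  obtain ⟨a, ha, hin⟩ := h
  rw [pvHitsOf, List.mem_filterMap]
  exact ⟨a, ha, by rw [if_pos hin, hall a ha]⟩

lemma pvSeg_of_not_any (message : String) (l : List (String × Int))
    (h : l.any (fun p => PySem.Str.isIn p.1 message) = false) :
    pvHitsOf message l = [] := by
  rw [pvHitsOf, List.filterMap_eq_nil_iff]
  intro a ha
  rw [List.any_eq_false] at h
  exact if_neg (h a ha)

-- first nonempty segment wins: the minimum of (segment ++ rest) is the segment's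
-- constant priority when all of rest is ≥ it
lemma pvMin_append (i : Int) (message : String) (g S : List (String × Int))
    (hallg : ∀ p ∈ g, p.2 = i) (hge : ∀ p ∈ S, i ≤ p.2)
    (hany : g.any (fun p => PySem.Str.isIn p.1 message) = true) :
    (pvHitsOf message (g ++ S)).min? = some i ∧ pvHitsOf message (g ++ S) ≠ [] := by
  have hmem : i ∈ pvHitsOf message (g ++ S) := by
    rw [pvHitsOf_append]
    exact List.mem_append_left _ (pvSeg_of_any message g i hallg hany)
  refine ⟨?_, List.ne_nil_of_mem hmem⟩
  rw [List.min?_eq_some_iff]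
  refine ⟨hmem, ?_⟩
  intro b hb
  rw [pvHitsOf_append, List.mem_append] at hb
  rcases hb with h | h
  · have hg : ∀ p ∈ g, i ≤ p.2 := fun p hp => (hallg p hp).ge
    exact pvSeg_all message g i hg b h
  · exact pvSeg_all message S i hge b h


-- groups and suffixes of the keyword table, used only by the proof
def pvG0 : List (String × Int) := [("nonprofit", 0), ("charity", 0), ("non-profit", 0), ("501c3", 0)]
def pvG1 : List (String × Int) := [("student", 1), ("education", 1), ("university", 1), ("school", 1)]
def pvG2 : List (String × Int) := [("startup", 2), ("new company", 2), ("just started", 2)]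
def pvG3 : List (String × Int) := [("annual", 3), ("yearly", 3), ("pay upfront", 3)]
def pvG4 : List (String × Int) := [("volume", 4), ("many users", 4), ("large team", 4)]
def pvG5 : List (String × Int) := [("budget", 5), ("expensive", 5), ("afford", 5), ("cost", 5)]
def pvS5 : List (String × Int) := pvG5
def pvS4 : List (String × Int) := pvG4 ++ pvS5
def pvS3 : List (String × Int) := pvG3 ++ pvS4
def pvS2 : List (String × Int) := pvG2 ++ pvS3
def pvS1 : List (String × Int) := pvG1 ++ pvS2
def pvS0 : List (String × Int) := pvG0 ++ pvS1

def pvE : List (String × Int) := []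

-- ===== VERDICT (by name: the statement is the Claim_ definition above) =====
theorem infer_reason_from_message_py_spec : Claim_equal_infer_reason_from_message_py := by
  intro message _
  unfold Spec_infer_reason_from_message_py
  unfold infer_reason_from_message_py infer_reason_from_message_py_alt
  show _ = (if pvHitsOf message pvS0 = [] then "general"
    else match (pvHitsOf message pvS0).min? with
    | some m => (PySem.List.pyGet? pvReasons m).getD ""
    | none => "")
  by_cases h0 : (["nonprofit", "charity", "non-profit", "501c3"] : List String).any (fun word => PySem.Str.isIn word message) = true
  case pos =>
    have key := pvMin_append 0 message pvG0 pvS1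
      (by decide) (by decide) h0
    rw [if_pos h0, show pvS0 = pvG0 ++ pvS1 from rfl, if_neg key.2, key.1]
    decide
  have hnil0 : pvHitsOf message pvG0 = [] :=
    pvSeg_of_not_any message pvG0 (Bool.eq_false_iff.mpr h0)
  rw [if_neg h0, show pvS0 = pvG0 ++ pvS1 from rfl, pvHitsOf_append, hnil0, List.nil_append]
  by_cases h1 : (["student", "education", "university", "school"] : List String).any (fun word => PySem.Str.isIn word message) = true
  case pos =>
    have key := pvMin_append 1 message pvG1 pvS2
      (by decide) (by decide) h1
    rw [if_pos h1, show pvS1 = pvG1 ++ pvS2 from rfl, if_neg key.2, key.1]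
    decide
  have hnil1 : pvHitsOf message pvG1 = [] :=
    pvSeg_of_not_any message pvG1 (Bool.eq_false_iff.mpr h1)
  rw [if_neg h1, show pvS1 = pvG1 ++ pvS2 from rfl, pvHitsOf_append, hnil1, List.nil_append]
  by_cases h2 : (["startup", "new company", "just started"] : List String).any (fun word => PySem.Str.isIn word message) = true
  case pos =>
    have key := pvMin_append 2 message pvG2 pvS3
      (by decide) (by decide) h2
    rw [if_pos h2, show pvS2 = pvG2 ++ pvS3 from rfl, if_neg key.2, key.1]
    decide
  have hnil2 : pvHitsOf message pvG2 = [] :=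
    pvSeg_of_not_any message pvG2 (Bool.eq_false_iff.mpr h2)
  rw [if_neg h2, show pvS2 = pvG2 ++ pvS3 from rfl, pvHitsOf_append, hnil2, List.nil_append]
  by_cases h3 : (["annual", "yearly", "pay upfront"] : List String).any (fun word => PySem.Str.isIn word message) = true
  case pos =>
    have key := pvMin_append 3 message pvG3 pvS4
      (by decide) (by decide) h3
    rw [if_pos h3, show pvS3 = pvG3 ++ pvS4 from rfl, if_neg key.2, key.1]
    decide
  have hnil3 : pvHitsOf message pvG3 = [] :=
    pvSeg_of_not_any message pvG3 (Bool.eq_false_iff.mpr h3)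
  rw [if_neg h3, show pvS3 = pvG3 ++ pvS4 from rfl, pvHitsOf_append, hnil3, List.nil_append]
  by_cases h4 : (["volume", "many users", "large team"] : List String).any (fun word => PySem.Str.isIn word message) = true
  case pos =>
    have key := pvMin_append 4 message pvG4 pvS5
      (by decide) (by decide) h4
    rw [if_pos h4, show pvS4 = pvG4 ++ pvS5 from rfl, if_neg key.2, key.1]
    decide
  have hnil4 : pvHitsOf message pvG4 = [] :=
    pvSeg_of_not_any message pvG4 (Bool.eq_false_iff.mpr h4)
  rw [if_neg h4, show pvS4 = pvG4 ++ pvS5 from rfl, pvHitsOf_append, hnil4, List.nil_append]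
  by_cases h5 : (["budget", "expensive", "afford", "cost"] : List String).any (fun word => PySem.Str.isIn word message) = true
  case pos =>
    have key := pvMin_append 5 message pvG5 pvE
      (by decide) (by decide) h5
    rw [if_pos h5, show pvS5 = pvG5 ++ pvE from rfl, if_neg key.2, key.1]
    decide
  have hnil5 : pvHitsOf message pvG5 = [] :=
    pvSeg_of_not_any message pvG5 (Bool.eq_false_iff.mpr h5)
  rw [if_neg h5, show pvS5 = pvG5 ++ pvE from rfl, pvHitsOf_append, hnil5, List.nil_append]
  rfl
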